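-- pv_equiv track=rewrite | github.com/Bergiu/aoc-2020 | 10/python/10.py | count_differences
-- ===== SOURCE A (Python) =====
-- def count_differences(numbers):
--     numbers = sorted(numbers)
--     one_jolt = 0
--     three_jolt = 0
--     for i, num in enumerate(numbers[1:]):
--         jolt = num - numbers[i]
--         if jolt == 1:
--             one_jolt += 1
--         elif jolt == 3:
--             three_jolt += 1
--     return (one_jolt, three_jolt)
-- ===== SOURCE B (Python) =====
-- def count_differences(numbers):
--     pool = set(numbers)
--     ones = sum(1 for v in pool if v + 1 in pool)
--     threes = sum(1 for v in pool
--                  if v + 3 in pool and v + 1 not in pool and v + 2 not in pool)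
--     return (ones, threes)
-- ===== Notes on version B (the rewrite author's own statement) =====
-- stated objective: alternative
-- what changed: B drops the sort entirely: it builds a hash set and counts, by membership queries, the values v with v+1 present (gap 1) and the values v with v+3 present but v+1, v+2 absent (gap 3), which equals A's count of adjacent sorted differences.
import Mathlib
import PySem

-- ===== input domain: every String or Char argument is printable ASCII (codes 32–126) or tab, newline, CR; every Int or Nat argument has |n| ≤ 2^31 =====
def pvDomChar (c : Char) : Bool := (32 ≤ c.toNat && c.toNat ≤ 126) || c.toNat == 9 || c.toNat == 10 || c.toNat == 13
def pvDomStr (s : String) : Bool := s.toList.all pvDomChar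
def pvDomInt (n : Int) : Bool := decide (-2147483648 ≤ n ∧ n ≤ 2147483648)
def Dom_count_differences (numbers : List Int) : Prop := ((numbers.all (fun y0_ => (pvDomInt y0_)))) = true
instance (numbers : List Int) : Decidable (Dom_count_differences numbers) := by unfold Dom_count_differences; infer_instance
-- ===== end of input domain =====

-- B replaces A's sort-then-scan with a hash-set algorithm: it counts values v with v+1 in the
-- set (gap 1) and values v with v+3 in the set but v+1, v+2 absent (gap 3) (objective: alternative).

-- ===== PORT A =====
def count_differences (numbers : List Int) : Int × Int :=
  let ns := PySem.List.sorted numbers (fun x => x) false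
  (PySem.List.enumerate (PySem.List.slice ns (some 1) none)).foldl
    (fun (acc : Int × Int) p =>
      let jolt := p.2 - PySem.List.pyGetD ns p.1 0
      if jolt = 1 then (acc.1 + 1, acc.2)
      else if jolt = 3 then (acc.1, acc.2 + 1)
      else acc) (0, 0)

-- ===== PORT B =====
def count_differences_alt (numbers : List Int) : Int × Int :=
  let pool := PySem.Set.ofList numbers
  let ones := pool.foldl
    (fun (acc : Int) v => if PySem.Set.contains pool (v + 1) then acc + 1 else acc) 0
  let threes := pool.foldl
    (fun (acc : Int) v =>
      if PySem.Set.contains pool (v + 3) && !PySem.Set.contains pool (v + 1)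
          && !PySem.Set.contains pool (v + 2) then acc + 1 else acc) 0
  (ones, threes)

-- ===== PRECONDITION & SPEC =====
def Spec_count_differences (numbers : List Int) (out : Int × Int) : Prop := out = count_differences_alt numbers
instance (numbers : List Int) (out : Int × Int) : Decidable (Spec_count_differences numbers out) := by unfold Spec_count_differences; infer_instance

-- ===== CLAIM (what is proved, stated in full; the proofs are below) =====
def Claim_equal_count_differences : Prop := ∀ (numbers : List Int), Dom_count_differences numbers → Spec_count_differences numbers (count_differences numbers)

-- ===== LEMMAS AND PROOFS =====

-- The index-based jolt values of A are exactly the adjacent-gap list of the sorted list.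
lemma jolts_eq_diffs (s : List Int) :
    (PySem.List.enumerate (s.drop 1) 0).map (fun p => p.2 - PySem.List.pyGetD s p.1 0)
      = (s.zip (s.drop 1)).map (fun p => p.2 - p.1) := by
  apply List.ext_getElem
  · simp [PySem.List.length_enumerate, List.length_zip]
  · intro k h1 h2
    have hk : k < (s.drop 1).length := by
      simpa [PySem.List.length_enumerate] using h1
    have hks : k < s.length := by
      have := hk; simp at this; omega
    simp [PySem.List.getElem_enumerate, List.getElem_zip, hks]

-- Folding A's branch body over a list of gaps counts the 1s and 3s.
lemma foldl_count13 (l : List Int) (a b : Int) :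
    l.foldl (fun (acc : Int × Int) d =>
        if d = 1 then (acc.1 + 1, acc.2)
        else if d = 3 then (acc.1, acc.2 + 1)
        else acc) (a, b)
      = (a + l.count 1, b + l.count 3) := by
  induction l generalizing a b with
  | nil => simp
  | cons x xs ih =>
    by_cases h1 : x = 1
    · subst h1; simp [List.foldl_cons, ih]; ring_nf
    · by_cases h3 : x = 3
      · subst h3; simp [List.foldl_cons, ih]; ring_nf
      · simp [List.foldl_cons, h1, h3, ih]

-- On a nondecreasing list, adjacent gaps of 1 correspond to distinct values v with v+1 present.
lemma gaps_count_one (t : List Int) (hp : t.Pairwise (· ≤ ·)) :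
    ((t.zip (t.drop 1)).map (fun p => p.2 - p.1)).count 1
      = t.dedup.countP (fun v => decide ((v + 1) ∈ t)) := by
  induction t with
  | nil => simp
  | cons a rest ih =>
    match rest with
    | [] => simp
    | b :: r =>
      obtain ⟨ha, hp'⟩ := List.pairwise_cons.mp hp
      obtain ⟨hbr, _⟩ := List.pairwise_cons.mp hp'
      have hab : a ≤ b := ha b (by simp)
      have key : ∀ c : Int, c ∈ b :: r → b ≤ c := by
        intro c hc
        rcases List.mem_cons.mp hc with h | h
        · omega
        · exact hbr c h
      by_cases hEq : a = b
      · have hmem : a ∈ b :: r := by simp [hEq]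
        have hcong : ∀ v ∈ (b :: r).dedup,
            (decide ((v + 1) ∈ a :: b :: r)) = (decide ((v + 1) ∈ b :: r)) := by
          intro v _
          apply decide_eq_decide.mpr
          constructor
          · intro h
            rcases List.mem_cons.mp h with h | h
            · simp [h, hEq]
            · exact h
          · intro h; exact List.mem_cons_of_mem _ h
        rw [List.dedup_cons_of_mem hmem, List.countP_congr (fun x hx => by rw [hcong x hx]), ← ih hp']
        have h0 : b - a = 0 := by omega
        simp [h0]
      · have hlt : a < b := lt_of_le_of_ne hab hEq
        have hnot : a ∉ b :: r := by
          intro h; have := key a h; omega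
        have hm1 : ((a + 1) ∈ a :: b :: r) ↔ b = a + 1 := by
          constructor
          · intro h
            rcases List.mem_cons.mp h with h | h
            · omega
            · have := key _ h; omega
          · intro h; exact List.mem_cons_of_mem _ (by simp [← h])
        have hcong : ∀ v ∈ (b :: r).dedup,
            (decide ((v + 1) ∈ a :: b :: r)) = (decide ((v + 1) ∈ b :: r)) := by
          intro v hv
          have hvm : v ∈ b :: r := List.dedup_subset _ hv
          have hvb : b ≤ v := key v hvm
          apply decide_eq_decide.mpr
          constructor
          · intro h
            rcases List.mem_cons.mp h with h | h
            · omega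
            · exact h
          · intro h; exact List.mem_cons_of_mem _ h
        rw [List.dedup_cons_of_notMem hnot]
        rw [List.countP_cons, List.countP_congr (fun x hx => by rw [hcong x hx]), ← ih hp']
        by_cases hb1 : b = a + 1
        · have hg : b - a = 1 := by omega
          simp [hg, hm1.mpr hb1]
        · have hg : b - a ≠ 1 := by omega
          have : ¬ ((a + 1) ∈ a :: b :: r) := fun h => hb1 (hm1.mp h)
          simp [hg, this]

-- On a nondecreasing list, adjacent gaps of 3 correspond to distinct values v with v+3
-- present and v+1, v+2 absent.
lemma gaps_count_three (t : List Int) (hp : t.Pairwise (· ≤ ·)) :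
    ((t.zip (t.drop 1)).map (fun p => p.2 - p.1)).count 3
      = t.dedup.countP (fun v =>
          decide ((v + 3) ∈ t) && !decide ((v + 1) ∈ t) && !decide ((v + 2) ∈ t)) := by
  induction t with
  | nil => simp
  | cons a rest ih =>
    match rest with
    | [] => simp
    | b :: r =>
      obtain ⟨ha, hp'⟩ := List.pairwise_cons.mp hp
      obtain ⟨hbr, _⟩ := List.pairwise_cons.mp hp'
      have hab : a ≤ b := ha b (by simp)
      have key : ∀ c : Int, c ∈ b :: r → b ≤ c := by
        intro c hc
        rcases List.mem_cons.mp hc with h | h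
        · omega
        · exact hbr c h
      by_cases hEq : a = b
      · have hmem : a ∈ b :: r := by simp [hEq]
        have hiff : ∀ c : Int, a < c → ((c ∈ a :: b :: r) ↔ (c ∈ b :: r)) := by
          intro c hc
          constructor
          · intro h
            rcases List.mem_cons.mp h with h | h
            · omega
            · exact h
          · intro h; exact List.mem_cons_of_mem _ h
        have hcong : ∀ v ∈ (b :: r).dedup,
            (decide ((v + 3) ∈ a :: b :: r) && !decide ((v + 1) ∈ a :: b :: r)
              && !decide ((v + 2) ∈ a :: b :: r))
            = (decide ((v + 3) ∈ b :: r) && !decide ((v + 1) ∈ b :: r)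
              && !decide ((v + 2) ∈ b :: r)) := by
          intro v hv
          have hvm : v ∈ b :: r := List.dedup_subset _ hv
          have hvb : b ≤ v := key v hvm
          have hva : a ≤ v := le_trans hab hvb
          rw [decide_eq_decide.mpr (hiff (v + 3) (by omega)),
              decide_eq_decide.mpr (hiff (v + 1) (by omega)),
              decide_eq_decide.mpr (hiff (v + 2) (by omega))]
        rw [List.dedup_cons_of_mem hmem, List.countP_congr (fun x hx => by rw [hcong x hx]), ← ih hp']
        have h0 : b - a = 0 := by omega
        simp [h0]
      · have hlt : a < b := lt_of_le_of_ne hab hEq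
        have hnot : a ∉ b :: r := by
          intro h; have := key a h; omega
        have hmk : ∀ k : Int, a < k → ((k ∈ a :: b :: r) ↔ (b ≤ k ∧ k ∈ b :: r)) := by
          intro k hk
          constructor
          · intro h
            rcases List.mem_cons.mp h with h | h
            · omega
            · exact ⟨key k h, h⟩
          · intro h; exact List.mem_cons_of_mem _ h.2
        have hpa : (decide ((a + 3) ∈ a :: b :: r) && !decide ((a + 1) ∈ a :: b :: r)
              && !decide ((a + 2) ∈ a :: b :: r)) = true ↔ b = a + 3 := by
          simp only [Bool.and_eq_true, Bool.not_eq_eq_eq_not, Bool.not_true,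
            decide_eq_true_eq, decide_eq_false_iff_not]
          constructor
          · rintro ⟨⟨h3, n1⟩, n2⟩
            have hb3 : b ≤ a + 3 := ((hmk (a + 3) (by omega)).mp h3).1
            have hb1 : b ≠ a + 1 := by
              intro h; exact n1 (by simp [← h])
            have hb2 : b ≠ a + 2 := by
              intro h; exact n2 (by simp [← h])
            omega
          · intro h
            refine ⟨⟨List.mem_cons_of_mem _ (by simp [← h]), ?_⟩, ?_⟩
            · intro hc
              have := ((hmk (a + 1) (by omega)).mp hc).1; omega
            · intro hc
              have := ((hmk (a + 2) (by omega)).mp hc).1; omega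
        have hcong : ∀ v ∈ (b :: r).dedup,
            (decide ((v + 3) ∈ a :: b :: r) && !decide ((v + 1) ∈ a :: b :: r)
              && !decide ((v + 2) ∈ a :: b :: r))
            = (decide ((v + 3) ∈ b :: r) && !decide ((v + 1) ∈ b :: r)
              && !decide ((v + 2) ∈ b :: r)) := by
          intro v hv
          have hvm : v ∈ b :: r := List.dedup_subset _ hv
          have hvb : b ≤ v := key v hvm
          have e : ∀ k : Int, v < k → ((k ∈ a :: b :: r) ↔ (k ∈ b :: r)) := by
            intro k hk
            constructor
            · intro h
              rcases List.mem_cons.mp h with h | h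
              · omega
              · exact h
            · intro h; exact List.mem_cons_of_mem _ h
          rw [decide_eq_decide.mpr (e (v + 3) (by omega)),
              decide_eq_decide.mpr (e (v + 1) (by omega)),
              decide_eq_decide.mpr (e (v + 2) (by omega))]
        rw [List.dedup_cons_of_notMem hnot]
        rw [List.countP_cons, List.countP_congr (fun x hx => by rw [hcong x hx]), ← ih hp']
        by_cases hb3 : b = a + 3
        · have hg : b - a = 3 := by omega
          have hn1 : a + 1 ∉ r := fun h => by have := hbr _ h; omega
          have hn2 : a + 2 ∉ r := fun h => by have := hbr _ h; omega
          simp [hg]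
          exact ⟨Or.inl (by omega), by omega, hn1, by omega, hn2⟩
        · have hg : b - a ≠ 3 := by omega
          simp [hg]
          intro h3 hne1 _ hne2
          exfalso
          rcases h3 with h | h
          · omega
          · have := hbr _ h; omega

-- ===== VERDICT (by name: the statement is the Claim_ definition above) =====
theorem count_differences_spec : Claim_equal_count_differences := by
  intro numbers _
  unfold Spec_count_differences count_differences count_differences_alt
  set t := PySem.List.sorted numbers (fun x => x) false with ht
  set pool := PySem.Set.ofList numbers with hpool
  simp only [PySem.List.slice_from_one, ← List.drop_one]
  -- A's loop as counts over the gap list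
  have hfm := List.foldl_map
    (f := fun (p : Int × Int) => p.2 - PySem.List.pyGetD t p.1 0)
    (g := fun (acc : Int × Int) (d : Int) =>
      if d = 1 then (acc.1 + 1, acc.2)
      else if d = 3 then (acc.1, acc.2 + 1)
      else acc)
    (l := PySem.List.enumerate (t.drop 1) 0) (init := ((0 : Int), (0 : Int)))
  rw [show (fun (acc : Int × Int) (p : Int × Int) =>
      let jolt := p.2 - PySem.List.pyGetD t p.1 0
      if jolt = 1 then (acc.1 + 1, acc.2)
      else if jolt = 3 then (acc.1, acc.2 + 1)
      else acc) = (fun acc p =>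
      if (p.2 - PySem.List.pyGetD t p.1 0) = 1 then (acc.1 + 1, acc.2)
      else if (p.2 - PySem.List.pyGetD t p.1 0) = 3 then (acc.1, acc.2 + 1)
      else acc) from rfl]
  rw [← hfm, jolts_eq_diffs, foldl_count13]
  -- B's loops as countP over the distinct pool
  rw [PySem.List.foldl_if_add_one, PySem.List.foldl_if_add_one]
  -- bridge: pool is a permutation of the dedup of the sorted list
  have hpair : t.Pairwise (· ≤ ·) := PySem.List.sorted_pairwise numbers (fun x => x)
  have hperm : t.dedup.Perm pool := by
    rw [List.perm_ext_iff_of_nodup (List.nodup_dedup t) (PySem.Set.nodup_ofList numbers)]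
    intro x
    rw [List.mem_dedup, PySem.Set.mem_ofList]
    exact (PySem.List.sorted_perm numbers (fun x => x) false).mem_iff
  have hmemt : ∀ x : Int, x ∈ t ↔ x ∈ pool := by
    intro x
    rw [PySem.Set.mem_ofList]
    exact (PySem.List.sorted_perm numbers (fun x => x) false).mem_iff
  have h1 : ((t.zip (t.drop 1)).map (fun p => p.2 - p.1)).count 1
      = pool.countP (fun v => PySem.Set.contains pool (v + 1)) := by
    rw [gaps_count_one t hpair, hperm.countP_eq]
    apply List.countP_congr
    intro v _
    simp [PySem.Set.contains_eq_listContains, hmemt]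
  have h3 : ((t.zip (t.drop 1)).map (fun p => p.2 - p.1)).count 3
      = pool.countP (fun v => PySem.Set.contains pool (v + 3)
          && !PySem.Set.contains pool (v + 1) && !PySem.Set.contains pool (v + 2)) := by
    rw [gaps_count_three t hpair, hperm.countP_eq]
    apply List.countP_congr
    intro v _
    simp [PySem.Set.contains_eq_listContains, hmemt]
  rw [h1, h3]
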